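-- pv_equiv track=rewrite | github.com/Kimbumsoo99/Code_Test | temp/naver1.py | solution
-- ===== SOURCE A (Python) =====
-- def solution(arr):
--     arr_map = {}
--     count = []
--     for i in arr:
--         if i in arr_map:
--             arr_map[i] += 1
--         else:
--             arr_map[i] = 1
--     for key in sorted(arr_map.keys()):
--         if arr_map[key] > 1:
--             count.append(arr_map[key])
--     if len(count) == 0:
--         count.append(-1)
--     return count
-- ===== SOURCE B (Python) =====
-- def solution(arr):
--     # Sort once, then one linear two-pointer pass grouping consecutive equal
--     # runs; run lengths > 1 come out already ordered by key. No dict is built.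
--     s = sorted(arr)
--     out = []
--     n = len(s)
--     i = 0
--     while i < n:
--         j = i + 1
--         while j < n and s[j] == s[i]:
--             j += 1
--         if j - i > 1:
--             out.append(j - i)
--         i = j
--     return out if out else [-1]
-- ===== Notes on version B (the rewrite author's own statement) =====
-- stated objective: alternative
-- what changed: Replaces the hash-map frequency count plus sorted-keys pass by sorting the list once and a single linear two-pointer run-length scan over consecutive equal elements; no dict is built.
import Mathlib
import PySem

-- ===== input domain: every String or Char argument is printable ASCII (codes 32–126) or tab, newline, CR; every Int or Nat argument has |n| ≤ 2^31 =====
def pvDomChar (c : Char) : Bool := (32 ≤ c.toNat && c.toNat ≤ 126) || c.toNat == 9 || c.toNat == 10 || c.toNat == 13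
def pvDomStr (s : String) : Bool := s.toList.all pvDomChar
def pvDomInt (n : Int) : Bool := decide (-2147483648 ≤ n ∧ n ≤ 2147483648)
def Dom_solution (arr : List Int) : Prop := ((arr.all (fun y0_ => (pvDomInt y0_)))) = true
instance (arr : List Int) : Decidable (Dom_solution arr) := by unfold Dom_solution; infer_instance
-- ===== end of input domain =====

-- B replaces A's dict-of-counts + sorted-keys pass by sort-once then a single
-- run-length scan over consecutive equal elements (alternative decomposition, same O(n log n)).


-- ===== PORT A =====
def solution (arr : List Int) : List Int :=
  let arr_map : PySem.Dict Int Int :=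
    arr.foldl (fun d i => if d.contains i then d.modify i 0 (· + 1) else d.insert i 1)
      PySem.Dict.empty
  let count : List Int :=
    (PySem.List.sorted arr_map.keys (fun k => k) false).foldl
      (fun c key => if 1 < arr_map.getD key 0 then c ++ [arr_map.getD key 0] else c) []
  if count.length = 0 then count ++ [-1] else count

-- ===== PORT B =====
-- inner 'while j < n and s[j] == s[i]' of Source B (x is the value s[i]);
-- s.getD j 0 is exact for Python's s[j] since the guard gives j < n = len(s)
def runEnd (s : List Int) (n : Nat) (x : Int) (j : Nat) : Nat :=
  if h : j < n ∧ s.getD j 0 = x then runEnd s n x (j + 1) else j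
termination_by n - j
decreasing_by omega

theorem runEnd_ge (s : List Int) (n : Nat) (x : Int) (j : Nat) : j ≤ runEnd s n x j := by
  induction j using runEnd.induct s n x with
  | case1 j h ih => rw [runEnd, dif_pos h]; omega
  | case2 j h => rw [runEnd, dif_neg h]

-- outer 'while i < n' of Source B, carrying the output list
def runIdx (s : List Int) (n : Nat) (i : Nat) (out : List Int) : List Int :=
  if h : i < n then
    let j := runEnd s n (s.getD i 0) (i + 1)
    runIdx s n j (if 1 < j - i then out ++ [((j - i : Nat) : Int)] else out)
  else out
termination_by n - i
decreasing_by
  have := runEnd_ge s n (s.getD i 0) (i + 1)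
  omega

def solution_alt (arr : List Int) : List Int :=
  let s := PySem.List.sorted arr (fun x => x) false
  let out := runIdx s s.length 0 []
  if out = [] then [-1] else out

-- ===== PRECONDITION & SPEC =====
def Spec_solution (arr : List Int) (out : List Int) : Prop := out = solution_alt arr
instance (arr : List Int) (out : List Int) : Decidable (Spec_solution arr out) := by unfold Spec_solution; infer_instance

-- ===== CLAIM (what is proved, stated in full; the proofs are below) =====
def Claim_equal_solution : Prop := ∀ (arr : List Int), Dom_solution arr → Spec_solution arr (solution arr)

-- ===== LEMMAS AND PROOFS =====

-- proof-side reformulation of B's two-pointer scan as structural recursion on runs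
def runsB : List Int → List Int
  | [] => []
  | x :: xs =>
    let c : Nat := 1 + (xs.takeWhile (fun y => y == x)).length
    (if 1 < c then [(c : Int)] else []) ++ runsB (xs.dropWhile (fun y => y == x))
termination_by s => s.length
decreasing_by
  simp only [List.length_cons]
  exact Nat.lt_succ_of_le (xs.dropWhile_sublist _).length_le

-- A's counting loop step is exactly Counter's step
theorem step_eq (d : PySem.Dict Int Int) (i : Int) :
    (if d.contains i then d.modify i 0 (· + 1) else d.insert i 1) = d.modify i 0 (· + 1) := by
  by_cases h : d.contains i
  · simp [h]
  · simp only [Bool.not_eq_true] at h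
    rw [if_neg (by simp [h]), PySem.Dict.modify, PySem.Dict.getD_of_not_contains d 0 h]
    norm_num

theorem foldA_eq_counter (arr : List Int) :
    arr.foldl (fun d i => if d.contains i then d.modify i 0 (· + 1) else d.insert i 1)
      PySem.Dict.empty = PySem.Dict.counter arr := by
  rw [PySem.Dict.counter_eq_foldl]
  exact List.foldl_ext _ _ _ (fun d i _ => step_eq d i)

-- A's appending loop as filter+map (Prop-valued test version of foldl_append_if)
theorem foldl_append_if' (p : Int → Prop) [DecidablePred p] (f : Int → Int)
    (l : List Int) (acc : List Int) :
    l.foldl (fun c k => if p k then c ++ [f k] else c) acc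
      = acc ++ (l.filter (fun k => decide (p k))).map f := by
  induction l generalizing acc with
  | nil => simp
  | cons x xs ih =>
    rw [List.foldl_cons, ih, List.filter_cons]
    by_cases h : p x
    · rw [if_pos h, if_pos (by simpa using h)]; simp
    · rw [if_neg h, if_neg (by simpa using h)]

theorem ofList_double_cons (x : Int) (l : List Int) :
    PySem.Set.ofList (x :: x :: l) = PySem.Set.ofList (x :: l) := by
  simp [PySem.Set.ofList_cons, PySem.Set.discard, List.filter_filter]

theorem ofList_cons_all_eq (x : Int) (t r : List Int)
    (ht : ∀ y ∈ t, y = x) (hxr : x ∉ r) :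
    PySem.Set.ofList (x :: (t ++ r)) = x :: PySem.Set.ofList r := by
  induction t with
  | nil =>
    rw [List.nil_append, PySem.Set.ofList_cons]
    have hd : (PySem.Set.ofList r).discard x = PySem.Set.ofList r := by
      apply List.filter_eq_self.mpr
      intro y hy
      have hyr : y ∈ r := (PySem.Set.mem_ofList r y).mp hy
      simp only [Bool.not_eq_eq_eq_not, Bool.not_true, beq_eq_false_iff_ne, ne_eq]
      exact fun h => hxr (h ▸ hyr)
    rw [hd]
  | cons y t' ih =>
    have hy : y = x := ht y (by simp)
    rw [show (y :: t') ++ r = y :: (t' ++ r) from rfl, hy, ofList_double_cons]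
    exact ih (fun z hz => ht z (by simp [hz]))

-- Set.ofList keeps first occurrences in order: it is a sublist of its argument
theorem ofList_sublist (l : List Int) : (PySem.Set.ofList l).Sublist l := by
  induction l using List.reverseRecOn with
  | nil => simp [PySem.Set.ofList]
  | append_singleton xs x ih =>
    rw [PySem.Set.ofList_append_singleton, PySem.Set.add]
    by_cases h : (PySem.Set.ofList xs).contains x
    · rw [if_pos h]
      exact ih.trans (xs.sublist_append_left [x])
    · rw [if_neg h]
      exact List.Sublist.append ih (List.Sublist.refl [x])

-- runsB on a ≤-sorted list lists the multiplicities > 1 of its distinct values in order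
theorem runsB_sorted (s : List Int) (hs : s.Pairwise (· ≤ ·)) :
    runsB s = ((PySem.List.dedup s).filter (fun k => decide (1 < s.count k))).map
      (fun k => ((s.count k : Nat) : Int)) := by
  induction s using runsB.induct with
  | case1 => simp [runsB, PySem.List.dedup]
  | case2 x xs ih =>
    set t := xs.takeWhile (fun y => y == x) with htdef
    set r := xs.dropWhile (fun y => y == x) with hrdef
    have hxs : t ++ r = xs := List.takeWhile_append_dropWhile
    have ht : ∀ y ∈ t, y = x := fun y hy => by
      have := List.mem_takeWhile_imp hy; simpa using this
    have hxle : ∀ y ∈ xs, x ≤ y := (List.pairwise_cons.mp hs).1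
    have hxs_pw : xs.Pairwise (· ≤ ·) := (List.pairwise_cons.mp hs).2
    have hr_sub : r.Sublist xs := xs.dropWhile_sublist _
    have hr_pw : r.Pairwise (· ≤ ·) := List.Pairwise.sublist hr_sub hxs_pw
    have hxr : x ∉ r := by
      cases hr : r with
      | nil => simp
      | cons y r' =>
        have hy : (y == x) = false := by
          have h := List.head?_dropWhile_not (fun y => y == x) xs
          rw [← hrdef, hr] at h
          simpa using h
        have hyx : x < y := by
          have h1 : x ≤ y := hxle y (hr_sub.mem (by simp [hr]))
          have h2 : y ≠ x := by simpa using hy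
          omega
        have hyr' : ∀ z ∈ r', y ≤ z := (List.pairwise_cons.mp (hr ▸ hr_pw)).1
        intro hmem
        rcases List.mem_cons.mp hmem with h | h
        · omega
        · have := hyr' x h; omega
    have hcount_x : (x :: xs).count x = 1 + t.length := by
      rw [← hxs, show x :: (t ++ r) = (x :: t) ++ r from rfl, List.count_append]
      have h1 : (x :: t).count x = (x :: t).length :=
        List.count_eq_length.mpr (fun b hb => by
          rcases List.mem_cons.mp hb with h | h
          · exact h.symm
          · exact (ht b h).symm)
      have h2 : r.count x = 0 := List.count_eq_zero.mpr hxr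
      simp [h1, h2, Nat.add_comm]
    have hcount_ne : ∀ k, k ≠ x → (x :: xs).count k = r.count k := by
      intro k hk
      rw [← hxs, show x :: (t ++ r) = (x :: t) ++ r from rfl, List.count_append]
      have h1 : (x :: t).count k = 0 := List.count_eq_zero.mpr (by
        intro hmem
        rcases List.mem_cons.mp hmem with h | h
        · exact hk h
        · exact hk (ht k h))
      simp [h1]
    have hded : PySem.List.dedup (x :: xs) = x :: PySem.List.dedup r := by
      rw [PySem.List.dedup_eq_ofList, PySem.List.dedup_eq_ofList, ← hxs]
      exact ofList_cons_all_eq x t r ht hxr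
    rw [runsB, hded]
    have hkr : ∀ k ∈ PySem.List.dedup r, k ≠ x := by
      intro k hk
      have hkr' : k ∈ r := by
        rw [PySem.List.dedup_eq_ofList] at hk; exact (PySem.Set.mem_ofList r k).mp hk
      exact fun h => hxr (h ▸ hkr')
    have hfc : (PySem.List.dedup r).filter (fun k => decide (1 < (x :: xs).count k))
        = (PySem.List.dedup r).filter (fun k => decide (1 < r.count k)) := by
      apply List.filter_congr
      intro k hk
      rw [hcount_ne k (hkr k hk)]
    have hmc : ∀ l : List Int, (∀ k ∈ l, k ∈ PySem.List.dedup r) →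
        l.map (fun k => (((x :: xs).count k : Nat) : Int))
          = l.map (fun k => ((r.count k : Nat) : Int)) := by
      intro l hl
      apply List.map_congr_left
      intro k hk
      rw [hcount_ne k (hkr k (hl k hk))]
    have htail : List.map (fun k => (((x :: xs).count k : Nat) : Int))
        ((PySem.List.dedup r).filter (fun k => decide (1 < (x :: xs).count k))) = runsB r := by
      rw [hfc, hmc _ (fun k hk => List.mem_of_mem_filter hk), ih hr_pw]
    rw [← hcount_x]
    by_cases hc : 1 < (x :: xs).count x
    · rw [if_pos hc, List.filter_cons,
        if_pos (show decide (1 < (x :: xs).count x) = true by simpa using hc),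
        List.map_cons, htail]
      rfl
    · rw [if_neg hc, List.filter_cons,
        if_neg (show ¬ decide (1 < (x :: xs).count x) = true by simpa using hc), htail]
      rfl


theorem runEnd_eq (s : List Int) (x : Int) (j : Nat) :
    runEnd s s.length x j = j + ((s.drop j).takeWhile (fun y => y == x)).length := by
  induction j using runEnd.induct s s.length x with
  | case1 j h ih =>
    rw [runEnd, dif_pos h]
    obtain ⟨hj, hx⟩ := h
    rw [List.drop_eq_getElem_cons hj, List.takeWhile_cons,
      if_pos (by simpa using (List.getD_eq_getElem s 0 hj ▸ hx))]
    simp only [List.length_cons] at *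
    omega
  | case2 j h =>
    rw [runEnd, dif_neg h]
    by_cases hj : j < s.length
    · have hx : ¬ s.getD j 0 = x := fun hc => h ⟨hj, hc⟩
      rw [List.drop_eq_getElem_cons hj, List.takeWhile_cons,
        if_neg (by simpa using (List.getD_eq_getElem s 0 hj ▸ hx))]
      simp
    · rw [List.drop_eq_nil_of_le (by omega)]
      simp

theorem dropWhile_eq_drop (p : Int → Bool) (l : List Int) :
    l.dropWhile p = l.drop (l.takeWhile p).length := by
  calc l.dropWhile p
      = ((l.takeWhile p) ++ (l.dropWhile p)).drop (l.takeWhile p).length := by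
        rw [List.drop_left]
    _ = l.drop (l.takeWhile p).length := by
        rw [List.takeWhile_append_dropWhile]

theorem runIdx_eq (s : List Int) (i : Nat) (out : List Int) :
    runIdx s s.length i out = out ++ runsB (s.drop i) := by
  induction i, out using runIdx.induct s s.length with
  | case1 i out h j ih =>
    rw [runIdx, dif_pos h]
    have hj : j = runEnd s s.length (s.getD i 0) (i + 1) := rfl
    have ih' : runIdx s s.length j (if 1 < j - i then out ++ [((j - i : Nat) : Int)] else out)
        = (if 1 < j - i then out ++ [((j - i : Nat) : Int)] else out) ++ runsB (s.drop j) := ih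
    show runIdx s s.length j (if 1 < j - i then out ++ [((j - i : Nat) : Int)] else out)
        = out ++ runsB (s.drop i)
    rw [ih']
    have hx : s.getD i 0 = s[i] := List.getD_eq_getElem s 0 h
    have hdrop : s.drop i = s[i] :: s.drop (i + 1) := List.drop_eq_getElem_cons h
    set tl := ((s.drop (i + 1)).takeWhile (fun y => y == s[i])).length with htl
    have hre : j = (i + 1) + tl := by rw [hj, runEnd_eq, hx, htl]
    have hdw : (s.drop (i + 1)).dropWhile (fun y => y == s[i]) = s.drop j := by
      rw [dropWhile_eq_drop, List.drop_drop, ← htl, hre, Nat.add_comm]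
    have hji : j - i = 1 + tl := by omega
    rw [hdrop, runsB]
    simp only [hdw, ← htl, hji]
    by_cases hc : 1 < 1 + tl
    · rw [if_pos hc, if_pos hc, List.append_assoc]
    · rw [if_neg hc, if_neg hc, List.nil_append]
  | case2 i out h =>
    rw [runIdx, dif_neg h, List.drop_eq_nil_of_le (by omega), runsB]
    simp

-- ===== VERDICT (by name: the statement is the Claim_ definition above) =====
theorem solution_spec : Claim_equal_solution := by
  intro arr _
  unfold Spec_solution solution solution_alt
  simp only [foldA_eq_counter, PySem.Dict.keys_counter]
  rw [foldl_append_if' (fun key => 1 < (PySem.Dict.counter arr).getD key 0)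
    (fun key => (PySem.Dict.counter arr).getD key 0)]
  set s := PySem.List.sorted arr (fun x => x) false with hsdef
  have hs_pw : s.Pairwise (· ≤ ·) := by
    have := PySem.List.sorted_pairwise arr (fun x => x)
    simpa using this
  have hperm : s.Perm arr := PySem.List.sorted_perm arr (fun x => x) false
  have hkeys : PySem.List.sorted (PySem.Set.ofList arr) (fun k => k) false
      = PySem.List.dedup s := by
    apply PySem.List.sorted_eq_of_perm_of_pairwise_lt
    · rw [PySem.List.dedup_eq_ofList]
      apply (List.perm_ext_iff_of_nodup (PySem.Set.nodup_ofList s) (PySem.Set.nodup_ofList arr)).mpr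
      intro a
      rw [PySem.Set.mem_ofList, PySem.Set.mem_ofList]
      exact ⟨fun h => hperm.mem_iff.mp h, fun h => hperm.mem_iff.mpr h⟩
    · have h1 : (PySem.List.dedup s).Pairwise (· ≤ ·) :=
        List.Pairwise.sublist (by rw [PySem.List.dedup_eq_ofList]; exact ofList_sublist s) hs_pw
      have h2 : (PySem.List.dedup s).Pairwise (· ≠ ·) := by
        rw [PySem.List.dedup_eq_ofList]; exact PySem.Set.nodup_ofList s
      exact (h1.and h2).imp (fun h => lt_of_le_of_ne h.1 h.2)
  have hcnt : ∀ k : Int, s.count k = arr.count k := fun k => hperm.count_eq k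
  have hgetD : ∀ k : Int, (PySem.Dict.counter arr).getD k 0 = ((s.count k : Nat) : Int) := by
    intro k
    rw [PySem.Dict.getD_counter, hcnt]
  have hL : ((PySem.List.sorted (PySem.Set.ofList arr) (fun k => k) false).filter
        (fun k => decide (1 < (PySem.Dict.counter arr).getD k 0))).map
        (fun k => (PySem.Dict.counter arr).getD k 0) = runIdx s s.length 0 [] := by
    rw [runIdx_eq s 0 [], List.nil_append, List.drop_zero, hkeys, runsB_sorted s hs_pw]
    have hf : (PySem.List.dedup s).filter (fun k => decide (1 < (PySem.Dict.counter arr).getD k 0))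
        = (PySem.List.dedup s).filter (fun k => decide (1 < s.count k)) := by
      apply List.filter_congr
      intro k _
      rw [hgetD k]
      simp
    rw [hf]
    apply List.map_congr_left
    intro k _
    rw [hgetD k]
  rw [List.nil_append, hL]
  by_cases h : runIdx s s.length 0 [] = []
  · rw [if_pos (by simp [h]), if_pos h, h, List.nil_append]
  · rw [if_neg (by simp [h]), if_neg h]
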